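-- pv_equiv track=rewrite | github.com/kaelthasmanu/SquidStats | services/security/blocklist_enforcement.py | _strip_acl_and_comment
-- ===== SOURCE A (Python) =====
-- def _strip_acl_and_comment(lines: list[str], acl_line: str) -> list[str]:
--     """Strip an ACL line and the ``# Blocklist:`` comment above it."""
--     new_lines: list[str] = []
--     for ln in lines:
--         stripped = ln.strip()
--         if stripped == acl_line or stripped == acl_line.replace('"', "'"):
--             if new_lines and new_lines[-1].strip().startswith("# Blocklist:"):
--                 new_lines.pop()
--             continue
--         new_lines.append(ln)
--     return new_lines
-- ===== SOURCE B (Python) =====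
-- def _strip_acl_and_comment(lines: list[str], acl_line: str) -> list[str]:
--     """Strip an ACL line and the ``# Blocklist:`` comment above it."""
--     alt = acl_line.replace('"', "'")
--     out: list[str] = []
--     pending = 0  # matched ACL lines seen to the right whose comment-pop is still live
--     for ln in reversed(lines):
--         s = ln.strip()
--         if s == acl_line or s == alt:
--             pending += 1
--         elif pending > 0 and s.startswith("# Blocklist:"):
--             pending -= 1
--         else:
--             pending = 0
--             out.append(ln)
--     out.reverse()
--     return out
-- ===== Notes on version B (the rewrite author's own statement) =====
-- stated objective: alternative
-- what changed: B replaces A's left-to-right accumulate-then-pop look-behind with a single right-to-left pass keeping a pending-pops counter (matched ACL line increments it, a '# Blocklist:' comment is dropped while a pop is pending, any other line resets it and is kept), and computes the quote-swapped variant of acl_line once instead of once per line.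
import Mathlib
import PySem

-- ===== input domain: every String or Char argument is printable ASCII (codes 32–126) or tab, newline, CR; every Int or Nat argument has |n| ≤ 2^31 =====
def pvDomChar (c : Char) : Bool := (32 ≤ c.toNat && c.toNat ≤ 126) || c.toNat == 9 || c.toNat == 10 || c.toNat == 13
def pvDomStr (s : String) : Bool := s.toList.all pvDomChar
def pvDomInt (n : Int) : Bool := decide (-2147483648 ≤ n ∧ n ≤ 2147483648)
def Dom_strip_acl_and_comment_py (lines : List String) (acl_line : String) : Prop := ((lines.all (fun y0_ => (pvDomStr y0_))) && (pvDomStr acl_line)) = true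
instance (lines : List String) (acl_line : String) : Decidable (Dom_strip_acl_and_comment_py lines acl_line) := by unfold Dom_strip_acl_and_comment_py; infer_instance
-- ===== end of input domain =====

-- B replaces A's append-then-pop look-behind by a single right-to-left pass with a
-- pending-pops counter (objective: alternative decomposition, same O(n) cost).

-- ===== PORT A =====
-- the body of A's for-loop: match → maybe pop the last kept line; else append
def stripAStep (acl_line : String) (new_lines : List String) (ln : String) : List String :=
  let stripped := PySem.Str.strip ln
  if stripped = acl_line ∨ stripped = PySem.Str.replace acl_line "\"" "'" then
    if new_lines ≠ [] ∧ PySem.Str.startswith (PySem.Str.strip ((new_lines.getLast?).getD "")) "# Blocklist:" = true then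
      new_lines.dropLast
    else new_lines
  else new_lines ++ [ln]

def strip_acl_and_comment_py (lines : List String) (acl_line : String) : List String :=
  lines.foldl (stripAStep acl_line) []

-- ===== PORT B =====
-- the body of B's for-loop over reversed(lines); state = (pending, out)
def stripBStep (acl_line alt : String) (st : Nat × List String) (ln : String) : Nat × List String :=
  let s := PySem.Str.strip ln
  if s = acl_line ∨ s = alt then (st.1 + 1, st.2)
  else if 0 < st.1 ∧ PySem.Str.startswith s "# Blocklist:" = true then (st.1 - 1, st.2)
  else (0, st.2 ++ [ln])

def strip_acl_and_comment_py_alt (lines : List String) (acl_line : String) : List String :=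
  let alt := PySem.Str.replace acl_line "\"" "'"
  ((lines.reverse.foldl (stripBStep acl_line alt) (0, [])).2).reverse

-- ===== PRECONDITION & SPEC =====
def Spec_strip_acl_and_comment_py (lines : List String) (acl_line : String) (out : List String) : Prop := out = strip_acl_and_comment_py_alt lines acl_line
instance (lines : List String) (acl_line : String) (out : List String) : Decidable (Spec_strip_acl_and_comment_py lines acl_line out) := by unfold Spec_strip_acl_and_comment_py; infer_instance

-- ===== CLAIM (what is proved, stated in full; the proofs are below) =====
def Claim_equal_strip_acl_and_comment_py : Prop := ∀ (lines : List String) (acl_line : String), Dom_strip_acl_and_comment_py lines acl_line → Spec_strip_acl_and_comment_py lines acl_line (strip_acl_and_comment_py lines acl_line)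

-- ===== LEMMAS AND PROOFS =====

-- right-to-left characterization of B's loop (foldr form of stripBStep, consing kept lines)
def bStepR (acl_line alt : String) (ln : String) (st : Nat × List String) : Nat × List String :=
  if PySem.Str.strip ln = acl_line ∨ PySem.Str.strip ln = alt then (st.1 + 1, st.2)
  else if 0 < st.1 ∧ PySem.Str.startswith (PySem.Str.strip ln) "# Blocklist:" = true then (st.1 - 1, st.2)
  else (0, ln :: st.2)

def gB (acl_line alt : String) (l : List String) : Nat × List String :=
  l.foldr (bStepR acl_line alt) (0, [])

-- pop up to k trailing "# Blocklist:" comments off acc, stopping at the first non-comment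
def popC : Nat → List String → List String
  | 0, acc => acc
  | p+1, acc =>
    if acc ≠ [] ∧ PySem.Str.startswith (PySem.Str.strip (acc.getLast?.getD "")) "# Blocklist:" = true
    then popC p acc.dropLast else acc

theorem popC_nil (p : Nat) : popC p [] = [] := by
  cases p with
  | zero => rfl
  | succ p => rw [popC, if_neg]; simp

theorem popC_concat_pos (p : Nat) (acc : List String) (ln : String)
    (hc : PySem.Str.startswith (PySem.Str.strip ln) "# Blocklist:" = true) :
    popC (p+1) (acc ++ [ln]) = popC p acc := by
  rw [popC, if_pos, List.dropLast_concat]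
  refine ⟨by simp, ?_⟩
  rw [List.getLast?_concat]
  simpa using hc

theorem popC_concat_neg (p : Nat) (acc : List String) (ln : String)
    (hc : ¬ PySem.Str.startswith (PySem.Str.strip ln) "# Blocklist:" = true) :
    popC p (acc ++ [ln]) = acc ++ [ln] := by
  cases p with
  | zero => rfl
  | succ p =>
    rw [popC, if_neg]
    intro h
    apply hc
    have := h.2
    rw [List.getLast?_concat] at this
    simpa using this

theorem popC_popC (m n : Nat) (acc : List String) :
    popC n (popC m acc) = popC (m + n) acc := by
  induction m generalizing acc with
  | zero => rw [popC]; rw [Nat.zero_add]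
  | succ m ih =>
    by_cases h : acc ≠ [] ∧ PySem.Str.startswith (PySem.Str.strip (acc.getLast?.getD "")) "# Blocklist:" = true
    · have h2 : m + 1 + n = (m + n) + 1 := by omega
      rw [popC, if_pos h, h2, popC, if_pos h, ih]
    · rw [popC, if_neg h]
      cases n with
      | zero => rw [popC, Nat.add_zero, popC, if_neg h]
      | succ n =>
        have h2 : m + 1 + (n + 1) = (m + n + 1) + 1 := by omega
        rw [popC, if_neg h, h2, popC, if_neg h]

theorem stepA_match (acl_line : String) (acc : List String) (ln : String)
    (h : PySem.Str.strip ln = acl_line ∨ PySem.Str.strip ln = PySem.Str.replace acl_line "\"" "'") :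
    stripAStep acl_line acc ln = popC 1 acc := by
  show (if _ ∨ _ then _ else _) = _
  rw [if_pos h, popC]
  by_cases hc : acc ≠ [] ∧ PySem.Str.startswith (PySem.Str.strip (acc.getLast?.getD "")) "# Blocklist:" = true
  · rw [if_pos hc, if_pos hc, popC]
  · rw [if_neg hc, if_neg hc]

theorem stepA_nomatch (acl_line : String) (acc : List String) (ln : String)
    (h : ¬ (PySem.Str.strip ln = acl_line ∨ PySem.Str.strip ln = PySem.Str.replace acl_line "\"" "'")) :
    stripAStep acl_line acc ln = acc ++ [ln] := by
  show (if _ ∨ _ then _ else _) = _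
  rw [if_neg h]

theorem foldlA_eq (acl_line : String) (l : List String) (acc : List String) :
    l.foldl (stripAStep acl_line) acc
      = popC (gB acl_line (PySem.Str.replace acl_line "\"" "'") l).1 acc
        ++ (gB acl_line (PySem.Str.replace acl_line "\"" "'") l).2 := by
  induction l generalizing acc with
  | nil => rw [List.foldl_nil, gB, List.foldr_nil, popC, List.append_nil]
  | cons ln rest ih =>
    have hg : gB acl_line (PySem.Str.replace acl_line "\"" "'") (ln :: rest)
        = bStepR acl_line (PySem.Str.replace acl_line "\"" "'") ln
            (gB acl_line (PySem.Str.replace acl_line "\"" "'") rest) := rfl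
    rcases hgr : gB acl_line (PySem.Str.replace acl_line "\"" "'") rest with ⟨q, u⟩
    rw [hgr] at hg
    rw [List.foldl_cons, ih, hgr, hg]
    by_cases hm : PySem.Str.strip ln = acl_line ∨ PySem.Str.strip ln = PySem.Str.replace acl_line "\"" "'"
    · rw [stepA_match acl_line acc ln hm, popC_popC, bStepR, if_pos hm, Nat.add_comm]
    · rw [stepA_nomatch acl_line acc ln hm, bStepR, if_neg hm]
      by_cases hcq : 0 < q ∧ PySem.Str.startswith (PySem.Str.strip ln) "# Blocklist:" = true
      · rw [if_pos hcq]
        obtain ⟨q', rfl⟩ : ∃ q', q = q' + 1 := ⟨q - 1, by omega⟩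
        rw [popC_concat_pos q' acc ln hcq.2]
        rfl
      · rw [if_neg hcq]
        rcases Nat.eq_zero_or_pos q with hq | hq
        · subst hq
          rw [popC, popC, List.append_assoc, List.singleton_append]
        · have hc : ¬ PySem.Str.startswith (PySem.Str.strip ln) "# Blocklist:" = true := by
            intro hc; exact hcq ⟨hq, hc⟩
          rw [popC_concat_neg q acc ln hc, popC, List.append_assoc, List.singleton_append]

theorem foldlB_eq (acl_line alt : String) (l : List String) (p : Nat) (o : List String) :
    l.reverse.foldl (stripBStep acl_line alt) (p, o)
      = ((l.foldr (bStepR acl_line alt) (p, [])).1,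
         o ++ (l.foldr (bStepR acl_line alt) (p, [])).2.reverse) := by
  induction l generalizing o with
  | nil => simp
  | cons ln rest ih =>
    rcases hgr : rest.foldr (bStepR acl_line alt) (p, []) with ⟨q, u⟩
    rw [List.reverse_cons, List.foldl_append, ih, hgr, List.foldl_cons, List.foldl_nil,
      List.foldr_cons, hgr]
    by_cases hm : PySem.Str.strip ln = acl_line ∨ PySem.Str.strip ln = alt
    · show (if _ ∨ _ then _ else _) = _
      rw [if_pos hm, bStepR, if_pos hm]
    · show (if _ ∨ _ then _ else _) = _
      rw [if_neg hm, bStepR, if_neg hm]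
      by_cases hcq : 0 < q ∧ PySem.Str.startswith (PySem.Str.strip ln) "# Blocklist:" = true
      · rw [if_pos hcq, if_pos hcq]
      · rw [if_neg hcq, if_neg hcq, List.reverse_cons, ← List.append_assoc]

-- ===== VERDICT (by name: the statement is the Claim_ definition above) =====
theorem strip_acl_and_comment_py_spec : Claim_equal_strip_acl_and_comment_py := by
  intro lines acl_line _
  show strip_acl_and_comment_py lines acl_line = strip_acl_and_comment_py_alt lines acl_line
  rw [strip_acl_and_comment_py, strip_acl_and_comment_py_alt, foldlA_eq, foldlB_eq]
  rw [List.nil_append, List.reverse_reverse]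
  rw [show gB acl_line (PySem.Str.replace acl_line "\"" "'") lines
        = lines.foldr (bStepR acl_line (PySem.Str.replace acl_line "\"" "'")) (0, []) from rfl]
  rw [popC_nil, List.nil_append]
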